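-- pv_equiv track=rewrite | github.com/eman1can/CoatiraneAdventures | src/text/screens/dungeon/__init__.py | create_bar
-- ===== SOURCE A (Python) =====
-- BOX_WIDTH = 17
--
-- def create_bar(left, right, middle, divider, size=8):
--     string = ""
--     for x in range(size):
--         if x == 0:
--             string += left
--         else:
--             string += middle
--         for _ in range(BOX_WIDTH):
--             string += divider
--     return string + right
-- ===== SOURCE B (Python) =====
-- BOX_WIDTH = 17
--
-- def create_bar(left, right, middle, divider, size=8):
--     if size <= 0:
--         return right
--     boxes = divider * BOX_WIDTH
--     return left + boxes + (middle + boxes) * (size - 1) + right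
-- ===== Notes on version B (the rewrite author's own statement) =====
-- stated objective: simpler
-- what changed: Replaces the nested character-appending loops with a closed-form string expression using string repetition (divider*17 and (middle+boxes)*(size-1)).
import Mathlib
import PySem

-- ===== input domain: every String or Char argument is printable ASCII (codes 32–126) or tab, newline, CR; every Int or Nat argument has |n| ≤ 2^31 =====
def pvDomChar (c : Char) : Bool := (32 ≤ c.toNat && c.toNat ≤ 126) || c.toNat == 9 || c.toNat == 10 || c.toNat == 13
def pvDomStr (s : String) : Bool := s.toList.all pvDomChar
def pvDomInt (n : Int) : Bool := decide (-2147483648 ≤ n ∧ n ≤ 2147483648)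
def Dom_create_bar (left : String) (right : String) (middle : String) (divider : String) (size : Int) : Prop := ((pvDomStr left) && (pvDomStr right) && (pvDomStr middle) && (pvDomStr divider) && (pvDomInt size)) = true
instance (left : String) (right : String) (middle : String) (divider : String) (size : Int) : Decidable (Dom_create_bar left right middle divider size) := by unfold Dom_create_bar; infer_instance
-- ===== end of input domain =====

-- B builds the bar by closed-form string repetition instead of A's nested per-character append loops (objective: simpler).
-- ===== PORT A =====
-- Literal port of A: both loops as foldls over pyRange, appending one piece at a time (on List Char; String.append is kernel-opaque).
def create_bar (left : String) (right : String) (middle : String) (divider : String) (size : Int) : String :=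
  String.ofList
    ((PySem.List.pyRange 0 size 1).foldl (fun s x =>
        (PySem.List.pyRange 0 17 1).foldl (fun s _ => s ++ divider.toList)
          (if x == (0 : Int) then s ++ left.toList else s ++ middle.toList)) []
      ++ right.toList)

-- ===== PORT B =====
-- Literal port of B: string repetition (Python's s * n is PySem.List.pyRepeat on the character list).
def create_bar_alt (left : String) (right : String) (middle : String) (divider : String) (size : Int) : String :=
  if size ≤ 0 then right
  else
    String.ofList (left.toList ++ PySem.List.pyRepeat divider.toList 17
      ++ PySem.List.pyRepeat (middle.toList ++ PySem.List.pyRepeat divider.toList 17) (size - 1)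
      ++ right.toList)

-- ===== PRECONDITION & SPEC =====
def Spec_create_bar (left : String) (right : String) (middle : String) (divider : String) (size : Int) (out : String) : Prop := out = create_bar_alt left right middle divider size
instance (left : String) (right : String) (middle : String) (divider : String) (size : Int) (out : String) : Decidable (Spec_create_bar left right middle divider size out) := by unfold Spec_create_bar; infer_instance

-- ===== CLAIM (what is proved, stated in full; the proofs are below) =====
def Claim_equal_create_bar : Prop := ∀ (left : String) (right : String) (middle : String) (divider : String) (size : Int), Dom_create_bar left right middle divider size → Spec_create_bar left right middle divider size (create_bar left right middle divider size)

-- ===== LEMMAS AND PROOFS =====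

-- folding 'append d' over any list appends one copy of d per element
theorem pv_foldl_append_rep (d : List Char) : ∀ (L : List Int) (s : List Char),
    L.foldl (fun s _ => s ++ d) s = s ++ (List.replicate L.length d).flatten := by
  intro L
  induction L with
  | nil => intro s; simp
  | cons x xs ih => intro s; simp [List.foldl_cons, ih, List.replicate_succ, List.append_assoc]

-- the inner BOX_WIDTH loop appends exactly 17 copies of the divider
theorem pv_inner (d s : List Char) :
    (PySem.List.pyRange 0 17 1).foldl (fun s _ => s ++ d) s
      = s ++ (List.replicate 17 d).flatten := by
  rw [pv_foldl_append_rep]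
  simp [PySem.List.length_pyRange_one]

theorem pv_flat_succ {α : Type} (X : List α) (n : Nat) :
    (List.replicate (n + 1) X).flatten = (List.replicate n X).flatten ++ X := by
  rw [List.replicate_succ', List.flatten_append, List.flatten_cons, List.flatten_nil, List.append_nil]

-- the outer loop, for n ≥ 1 iterations, in closed form
theorem pv_outer (l m d : List Char) (n : Nat) (hn : 1 ≤ n) :
    (PySem.List.pyRange 0 (n : Int) 1).foldl (fun s x =>
        (PySem.List.pyRange 0 17 1).foldl (fun s _ => s ++ d)
          (if x == (0 : Int) then s ++ l else s ++ m)) []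
      = l ++ (List.replicate 17 d).flatten
          ++ (List.replicate (n - 1) (m ++ (List.replicate 17 d).flatten)).flatten := by
  induction n with
  | zero => omega
  | succ k ih =>
    by_cases hk : 1 ≤ k
    · have h1 : (0 : Int) ≤ (k : Int) := by positivity
      have : ((k : Int) + 1) = ((k + 1 : Nat) : Int) := by push_cast; ring
      rw [← this, PySem.List.pyRange_one_succ_right h1, List.foldl_append, ih hk]
      have hne : ((k : Int) == (0 : Int)) = false := by
        simp; omega
      simp only [List.foldl, hne, if_neg, Bool.false_eq_true, not_false_eq_true]
      rw [pv_inner]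
      have : k + 1 - 1 = (k - 1) + 1 := by omega
      rw [this, pv_flat_succ (m ++ (List.replicate 17 d).flatten) (k - 1)]
      simp only [List.append_assoc]
    · have hk0 : k = 0 := by omega
      subst hk0
      have : ((1 : Nat) : Int) = (0 : Int) + 1 := by norm_num
      rw [this, PySem.List.pyRange_one_succ_right (le_refl 0)]
      simp [PySem.List.pyRange_one_eq_nil (le_refl (0 : Int))]

-- ===== VERDICT (by name: the statement is the Claim_ definition above) =====
theorem create_bar_spec : Claim_equal_create_bar := by
  intro left right middle divider size _
  unfold Spec_create_bar create_bar create_bar_alt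
  by_cases h : size ≤ 0
  · rw [if_pos h, PySem.List.pyRange_one_eq_nil h]
    simp
  · rw [if_neg h]
    have h1 : (1 : Int) ≤ size := by omega
    have hsz : size = ((size.toNat : Nat) : Int) := by omega
    have hn : 1 ≤ size.toNat := by omega
    rw [hsz]
    rw [pv_outer left.toList middle.toList divider.toList size.toNat hn]
    have h17 : PySem.List.pyRepeat divider.toList 17 = (List.replicate 17 divider.toList).flatten := rfl
    have hrep : PySem.List.pyRepeat (middle.toList ++ (List.replicate 17 divider.toList).flatten) (((size.toNat : Nat) : Int) - 1)
        = (List.replicate (size.toNat - 1) (middle.toList ++ (List.replicate 17 divider.toList).flatten)).flatten := by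
      have ht : ((((size.toNat : Nat) : Int)) - 1).toNat = size.toNat - 1 := by omega
      show (List.replicate ((((size.toNat : Nat) : Int)) - 1).toNat _).flatten = _
      rw [ht]
    rw [h17, hrep]
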